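-- pv_equiv track=rewrite | github.com/ms-alan/mini-openclaw | backend/graph/session_manager.py | _merge_consecutive_assistant
-- ===== SOURCE A (Python) =====
-- def _merge_consecutive_assistant(messages: list[dict]) -> list[dict]:
--     if not messages:
--         return []
--     merged = [messages[0].copy()]
--     for msg in messages[1:]:
--         if msg["role"] == "assistant" and merged[-1]["role"] == "assistant":
--             merged[-1]["content"] += "\n" + msg["content"]
--         else:
--             merged.append(msg.copy())
--     return merged
-- ===== SOURCE B (Python) =====
-- def _merge_consecutive_assistant(messages: list[dict]) -> list[dict]:
--     # Group-then-render: split into maximal runs of equal role (missing role -> None),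
--     # then emit each run; assistant runs of length > 1 collapse to one message
--     # whose content is the "\n"-join of the run's contents.
--     groups = []
--     for m in messages:
--         role = m.get("role")
--         if groups and groups[-1][0] == role:
--             groups[-1][1].append(m)
--         else:
--             groups.append((role, [m]))
--     out = []
--     for role, grp in groups:
--         if role == "assistant" and len(grp) > 1:
--             head = grp[0].copy()
--             head["content"] = "\n".join(m["content"] for m in grp)
--             out.append(head)
--         else:
--             out.extend(m.copy() for m in grp)
--     return out
-- ===== Notes on version B (the rewrite author's own statement) =====
-- stated objective: alternative
-- what changed: Replaces the running scan that mutates the last emitted message with a two-phase group-then-render pass: first split the list into maximal runs of equal role (m.get('role')), then emit each run, collapsing assistant runs of length > 1 into one message whose content is the '\n'-join of the run's contents.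
import Mathlib
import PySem

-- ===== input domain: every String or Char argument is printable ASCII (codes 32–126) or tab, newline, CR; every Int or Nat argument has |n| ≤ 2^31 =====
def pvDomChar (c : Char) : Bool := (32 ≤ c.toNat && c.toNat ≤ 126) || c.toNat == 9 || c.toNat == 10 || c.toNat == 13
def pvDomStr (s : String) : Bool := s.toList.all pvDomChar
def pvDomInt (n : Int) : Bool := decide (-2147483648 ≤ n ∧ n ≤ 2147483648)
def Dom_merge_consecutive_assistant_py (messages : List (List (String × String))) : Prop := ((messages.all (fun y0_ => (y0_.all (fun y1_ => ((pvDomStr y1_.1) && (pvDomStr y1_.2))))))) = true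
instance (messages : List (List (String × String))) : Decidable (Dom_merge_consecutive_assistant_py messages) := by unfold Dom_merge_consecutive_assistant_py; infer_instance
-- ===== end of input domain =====

-- B replaces A's running scan (which mutates the last emitted message) by a two-phase
-- group-then-render pass; same cost, different decomposition (objective: alternative).
-- Both programs copy their input dicts, so neither mutates its argument.

-- Shared dict primitives (dicts travel as assoc lists; PySem.Dict gives Python's lookup/overwrite semantics)
def pvGetD (m : List (String × String)) (k d : String) : String := (PySem.Dict.mk m).getD k d
def pvGet? (m : List (String × String)) (k : String) : Option String := (PySem.Dict.mk m).get? k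
def pvSet (m : List (String × String)) (k v : String) : List (String × String) :=
  ((PySem.Dict.mk m).insert k v).items
def pvHas (m : List (String × String)) (k : String) : Bool := (PySem.Dict.mk m).contains k

-- ===== PORT A =====
-- loop body of A: merge msg into merged[-1] when both roles are "assistant", else append a copy
def pvStepA (merged : List (List (String × String))) (msg : List (String × String)) :
    List (List (String × String)) :=
  if pvGetD msg "role" "" = "assistant" ∧ pvGetD (merged.getLastD []) "role" "" = "assistant" then
    merged.dropLast ++
      [pvSet (merged.getLastD []) "content"
        (pvGetD (merged.getLastD []) "content" "" ++ "\n" ++ pvGetD msg "content" "")]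
  else
    merged ++ [msg]

def merge_consecutive_assistant_py (messages : List (List (String × String))) :
    List (List (String × String)) :=
  match messages with
  | [] => []
  | m0 :: rest => rest.foldl pvStepA [m0]

-- ===== PORT B =====
-- phase 1 of B: split into maximal runs of equal role (m.get("role"): missing role -> None)
def pvStepB (gs : List (Option String × List (List (String × String))))
    (m : List (String × String)) : List (Option String × List (List (String × String))) :=
  let r := pvGet? m "role"
  match gs.getLast? with
  | some g => if g.1 = r then gs.dropLast ++ [(g.1, g.2 ++ [m])] else gs ++ [(r, [m])]
  | none => [(r, [m])]

-- phase 2 of B: render one run (assistant runs of length > 1 collapse to one joined message)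
def pvRender (g : Option String × List (List (String × String))) : List (List (String × String)) :=
  if g.1 = some "assistant" ∧ 1 < g.2.length then
    [pvSet (g.2.headD []) "content"
      (PySem.Str.join "\n" (g.2.map (fun m => pvGetD m "content" "")))]
  else
    g.2

def merge_consecutive_assistant_py_alt (messages : List (List (String × String))) :
    List (List (String × String)) :=
  (messages.foldl pvStepB []).foldl (fun out g => out ++ pvRender g) []

-- ===== PRECONDITION & SPEC =====
-- Pre_ is exactly the set of inputs on which Python's A returns (outside it A raises KeyError):
-- every message after the first has a "role" key, the predecessor of an "assistant" message has
-- a "role" key, and both members of an adjacent "assistant"/"assistant" pair have a "content" key.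
def Pre_merge_consecutive_assistant_py (messages : List (List (String × String))) : Prop :=
  (∀ m ∈ messages.tail, pvHas m "role" = true) ∧
  ∀ p ∈ messages.zip messages.tail,
    (pvGet? p.2 "role" = some "assistant" → pvHas p.1 "role" = true) ∧
    (pvGet? p.1 "role" = some "assistant" ∧ pvGet? p.2 "role" = some "assistant" →
      pvHas p.1 "content" = true ∧ pvHas p.2 "content" = true)
instance (messages : List (List (String × String))) : Decidable (Pre_merge_consecutive_assistant_py messages) := by
  unfold Pre_merge_consecutive_assistant_py; infer_instance

def pvWitness_merge_consecutive_assistant_py : (List (List (String × String))) :=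
  [[("role", "assistant"), ("content", "a")],
   [("role", "assistant"), ("content", "b"), ("x", "y")],
   [("role", "user"), ("content", "c")]]

def Spec_merge_consecutive_assistant_py (messages : List (List (String × String))) (out : List (List (String × String))) : Prop := out = merge_consecutive_assistant_py_alt messages
instance (messages : List (List (String × String))) (out : List (List (String × String))) : Decidable (Spec_merge_consecutive_assistant_py messages out) := by unfold Spec_merge_consecutive_assistant_py; infer_instance

-- ===== CLAIM (what is proved, stated in full; the proofs are below) =====
def Claim_equal_merge_consecutive_assistant_py : Prop := ∀ (messages : List (List (String × String))), Dom_merge_consecutive_assistant_py messages → Pre_merge_consecutive_assistant_py messages → Spec_merge_consecutive_assistant_py messages (merge_consecutive_assistant_py messages)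

-- ===== LEMMAS AND PROOFS =====

-- B's phase 2 as a function of the group list
def pvPhase2 (gs : List (Option String × List (List (String × String)))) :
    List (List (String × String)) :=
  gs.foldl (fun out g => out ++ pvRender g) []

theorem pvPhase2_eq_flatMap (gs : List (Option String × List (List (String × String)))) :
    pvPhase2 gs = gs.flatMap pvRender :=
  PySem.List.foldl_append_eq_flatMap pvRender gs []

theorem pvPhase2_concat (gs : List (Option String × List (List (String × String))))
    (g : Option String × List (List (String × String))) :
    pvPhase2 (gs ++ [g]) = pvPhase2 gs ++ pvRender g := by
  simp [pvPhase2_eq_flatMap]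

-- A's `== "assistant"` test on a getD-read role, phrased on B's get?-read role
theorem pvRoleD_iff (m : List (String × String)) :
    pvGetD m "role" "" = "assistant" ↔ pvGet? m "role" = some "assistant" := by
  rw [pvGetD, pvGet?, PySem.Dict.getD_eq_get?_getD]
  cases h : (PySem.Dict.mk m).get? "role" <;> simp_all

theorem pvJoin_singleton (a : String) : PySem.Str.join "\n" [a] = a := by
  simp [PySem.Str.join, PySem.Chars.join_singleton, String.ofList_toList]

-- "\n".join over a run grows one content at a time, exactly as A's `+=` does
theorem pvJoin_concat (c : String) (l : List String) (h : l ≠ []) :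
    PySem.Str.join "\n" (l ++ [c]) = PySem.Str.join "\n" l ++ "\n" ++ c := by
  simp only [PySem.Str.join, List.map_append, List.map_cons, List.map_nil]
  rw [show PySem.Chars.join "\n".toList (l.map String.toList ++ [c.toList]) =
        PySem.Chars.join "\n".toList (l.map String.toList) ++ "\n".toList ++ c.toList from ?_]
  · rw [String.ofList_append, String.ofList_append, String.ofList_toList, String.ofList_toList]
  · have hps : l.map String.toList ≠ [] := by simpa using h
    revert hps
    generalize l.map String.toList = ps
    intro hps
    induction ps with
    | nil => simp at hps
    | cons x xs ih =>
      cases xs with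
      | nil => simp [PySem.Chars.join_cons_cons, PySem.Chars.join_singleton]
      | cons y ys =>
        rw [List.cons_append, List.cons_append, PySem.Chars.join_cons_cons,
          PySem.Chars.join_cons_cons, ← List.cons_append, ih (by simp)]
        simp

theorem pvRole_pvSet_content (m : List (String × String)) (v : String) :
    pvGet? (pvSet m "content" v) "role" = pvGet? m "role" := by
  exact PySem.Dict.get?_insert_of_ne (PySem.Dict.mk m) (k := "content") (k' := "role") v
    (by decide)

theorem pvContent_pvSet_content (m : List (String × String)) (v : String) :
    pvGetD (pvSet m "content" v) "content" "" = v :=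
  PySem.Dict.getD_insert_self (PySem.Dict.mk m) "content" v ""

theorem pvSet_pvSet_content (m : List (String × String)) (v w : String) :
    pvSet (pvSet m "content" v) "content" w = pvSet m "content" w := by
  simp only [pvSet]
  rw [show PySem.Dict.mk ((PySem.Dict.mk m).insert "content" v).items
        = (PySem.Dict.mk m).insert "content" v from rfl,
    PySem.Dict.insert_insert_self]

-- the last message rendered from a run (r, grp) carries role r
theorem pvRole_last_render (r : Option String) (grp : List (List (String × String)))
    (hne : grp ≠ []) (hr : ∀ m ∈ grp, pvGet? m "role" = r) :
    pvGet? ((pvRender (r, grp)).getLastD []) "role" = r := by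
  rcases grp with _ | ⟨g0, gs⟩
  · exact absurd rfl hne
  unfold pvRender
  split
  · simp only [List.getLastD_cons, List.getLastD_nil, List.headD_cons, pvRole_pvSet_content]
    exact hr g0 List.mem_cons_self
  · rw [List.getLastD_eq_getLast?, List.getLast?_eq_getLast_of_ne_nil hne]
    exact hr _ (List.getLast_mem hne)

theorem pvRender_ne_nil (r : Option String) (grp : List (List (String × String)))
    (hne : grp ≠ []) : pvRender (r, grp) ≠ [] := by
  unfold pvRender; split <;> simp [hne]

-- main invariant: A's running state is the rendering of B's group state
theorem pvMain (rest : List (List (String × String))) :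
    ∀ (pg : List (Option String × List (List (String × String))))
      (r : Option String) (grp : List (List (String × String))),
      grp ≠ [] → (∀ m ∈ grp, pvGet? m "role" = r) →
      rest.foldl pvStepA (pvPhase2 pg ++ pvRender (r, grp)) =
        pvPhase2 (rest.foldl pvStepB (pg ++ [(r, grp)])) := by
  induction rest with
  | nil => intro pg r grp _ _; simp [pvPhase2_concat]
  | cons msg rest ih =>
    intro pg r grp hne hr
    have hlast : (pvPhase2 pg ++ pvRender (r, grp)).getLastD [] =
        (pvRender (r, grp)).getLastD [] := by
      rw [List.getLastD_eq_getLast?, List.getLastD_eq_getLast?,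
        List.getLast?_append_of_ne_nil _ (pvRender_ne_nil r grp hne)]
    have hrole : pvGet? ((pvPhase2 pg ++ pvRender (r, grp)).getLastD []) "role" = r := by
      rw [hlast]; exact pvRole_last_render r grp hne hr
    simp only [List.foldl_cons]
    rw [show pvStepB (pg ++ [(r, grp)]) msg =
          if r = pvGet? msg "role" then pg ++ [(r, grp ++ [msg])]
          else (pg ++ [(r, grp)]) ++ [(pvGet? msg "role", [msg])] by
      simp only [pvStepB, List.getLast?_concat]
      split <;> simp]
    by_cases hsame : r = pvGet? msg "role"
    · -- msg joins the current run
      rw [if_pos hsame, ← ih pg r (grp ++ [msg]) (by simp)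
        (by intro m hm; rcases List.mem_append.1 hm with h | h
            · exact hr m h
            · simp at h; subst h; exact hsame.symm)]
      congr 1
      by_cases hass : r = some "assistant"
      · -- both roles "assistant": A merges, B's run grows
        rw [pvStepA, if_pos ⟨(pvRoleD_iff msg).2 (hsame ▸ hass),
          (pvRoleD_iff _).2 (hrole.trans hass)⟩]
        rcases grp with _ | ⟨g0, gs⟩
        · exact absurd rfl hne
        by_cases hlen : 1 < (g0 :: gs).length
        · -- the run already has a merged head
          rw [show pvRender (r, g0 :: gs) =
                [pvSet g0 "content"
                  (PySem.Str.join "\n" ((g0 :: gs).map (fun m => pvGetD m "content" "")))] from by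
              rw [pvRender, if_pos ⟨hass, hlen⟩]; rfl,
            show pvRender (r, (g0 :: gs) ++ [msg]) =
                [pvSet g0 "content"
                  (PySem.Str.join "\n" (((g0 :: gs) ++ [msg]).map (fun m => pvGetD m "content" "")))] from by
              rw [pvRender, if_pos ⟨hass, by simp⟩]; rfl]
          rw [List.dropLast_concat, List.getLastD_concat]
          rw [pvContent_pvSet_content, pvSet_pvSet_content, List.map_append,
            show List.map (fun m => pvGetD m "content" "") [msg] = [pvGetD msg "content" ""] from rfl,
            pvJoin_concat _ _ (by simp)]
        · -- the run was a single assistant message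
          have hgs : gs = [] := by
            rcases gs with _ | _
            · rfl
            · simp at hlen
          subst hgs
          rw [show pvRender (r, [g0]) = [g0] from by rw [pvRender, if_neg (by simp)],
            show pvRender (r, [g0] ++ [msg]) =
                [pvSet g0 "content"
                  (PySem.Str.join "\n" (([g0] ++ [msg]).map (fun m => pvGetD m "content" "")))] from by
              rw [pvRender, if_pos ⟨hass, by simp⟩]; rfl]
          rw [List.dropLast_concat, List.getLastD_concat, List.map_append,
            show List.map (fun m => pvGetD m "content" "") [msg] = [pvGetD msg "content" ""] from rfl,
            pvJoin_concat _ _ (by simp),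
            show List.map (fun m => pvGetD m "content" "") [g0] = [pvGetD g0 "content" ""] from rfl,
            pvJoin_singleton]
      · -- same non-assistant role: A appends, B's run grows
        rw [pvStepA, if_neg (by
          rintro ⟨h1, _⟩
          exact hass (hsame.trans ((pvRoleD_iff msg).1 h1 ▸ rfl)))]
        rw [show pvRender (r, grp) = grp from by
            rw [pvRender, if_neg (by rintro ⟨h1, _⟩; exact hass h1)],
          show pvRender (r, grp ++ [msg]) = grp ++ [msg] from by
            rw [pvRender, if_neg (by rintro ⟨h1, _⟩; exact hass h1)]]
        simp
    · -- msg starts a new run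
      rw [if_neg hsame, ← ih (pg ++ [(r, grp)]) (pvGet? msg "role") [msg] (by simp)
        (by simp), pvPhase2_concat]
      have : pvRender (pvGet? msg "role", [msg]) = [msg] := by
        unfold pvRender; split <;> simp_all
      rw [this]
      rw [show pvStepA (pvPhase2 pg ++ pvRender (r, grp)) msg =
            (pvPhase2 pg ++ pvRender (r, grp)) ++ [msg] from by
        rw [pvStepA, if_neg ?_]
        rintro ⟨h1, h2⟩
        rw [pvRoleD_iff] at h1 h2
        rw [hrole] at h2
        exact hsame (h2.trans h1.symm)]

-- ===== VERDICT (by name: the statement is the Claim_ definition above) =====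
theorem merge_consecutive_assistant_py_spec : Claim_equal_merge_consecutive_assistant_py := by
  intro messages _ _
  unfold Spec_merge_consecutive_assistant_py
  cases messages with
  | nil => rfl
  | cons m0 rest =>
    show List.foldl pvStepA [m0] rest = pvPhase2 (List.foldl pvStepB [] (m0 :: rest))
    rw [List.foldl_cons,
      show pvStepB [] m0 = [] ++ [(pvGet? m0 "role", [m0])] from by simp [pvStepB]]
    rw [← pvMain rest [] (pvGet? m0 "role") [m0] (by simp) (by simp)]
    have : pvRender (pvGet? m0 "role", [m0]) = [m0] := by
      unfold pvRender; split <;> simp_all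
    rw [this]
    rfl
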